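-- pv_equiv track=rewrite | github.com/tituka/ads_similarity | suggestions/tools/text_tools.py | replace_with_multi
-- ===== SOURCE A (Python) =====
-- def find_compound(token:str, ind:int,  token_list:list, word_vectors):
--     """Returns a compound token made up of token and the next after that, when one is found in the word vector model"""
--     longer=False
--     newt = token
--     n=1
--     all_longs=[x for x in all_concat(token_list[ind:]) if x[0] in word_vectors]
--     if not all_longs==[]:
--         best_all=max(all_longs, key=lambda x: x[1])
--         best_token=best_all[0]
--         best_len=best_all[1]
--     else:
--         best_token = token
--         best_len = 1
--     return best_token, best_len
--
-- def replace_with_multi(token_list, word_vectors):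
--     """Replaces single_word tokens with compound ones when they are found in the model. Addtionally, removes tokens
--     which are not in given set of word_vectors"""
--
--     new_list=[]
--     workn=0
--     n=1
--     nextgood=0
--     for count, item in enumerate(token_list):
--         if count<nextgood:
--             pass
--         else:
--             newc=find_compound(item, count, token_list, word_vectors)
--             new_list.append(newc[0])
--             nextgood=count+newc[1] +1
--     new_list=[x for x in new_list if x in word_vectors]
--     return new_list
--
-- def all_concat(token_list):
--     all_list=[]
--     for i in range(len(token_list)):
--         all_list.append([('_').join(token_list[:i+1]), i])
--     return(all_list)
-- ===== SOURCE B (Python) =====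
-- def replace_with_multi(token_list, word_vectors):
--     """Replaces single_word tokens with compound ones when they are found in the model. Addtionally, removes tokens
--     which are not in given set of word_vectors"""
--     vocab = set(word_vectors)
--     out = []
--     pos = 0
--     n = len(token_list)
--     while pos < n:
--         joined = ""
--         best = None
--         for j in range(pos, n):
--             joined = token_list[j] if j == pos else joined + "_" + token_list[j]
--             if joined in vocab:
--                 best = (joined, j - pos)
--         if best is None:
--             # token at pos is not in the vocabulary (and no compound from it is):
--             # it is dropped, and the next token is skipped, exactly as in the original
--             pos += 2
--         else:
--             out.append(best[0])
--             pos += best[1] + 1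
--     return out
-- ===== Notes on version B (the rewrite author's own statement) =====
-- stated objective: faster
-- what changed: Instead of materialising, for every processed position, the full list of all prefix-joined compounds (each join re-built from scratch), filtering it and taking a max, B keeps one set of the vocabulary, grows the joined compound string incrementally per start position while tracking the last in-vocabulary length, and advances by jumps, never building intermediate lists and needing no final filter pass.
import Mathlib
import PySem

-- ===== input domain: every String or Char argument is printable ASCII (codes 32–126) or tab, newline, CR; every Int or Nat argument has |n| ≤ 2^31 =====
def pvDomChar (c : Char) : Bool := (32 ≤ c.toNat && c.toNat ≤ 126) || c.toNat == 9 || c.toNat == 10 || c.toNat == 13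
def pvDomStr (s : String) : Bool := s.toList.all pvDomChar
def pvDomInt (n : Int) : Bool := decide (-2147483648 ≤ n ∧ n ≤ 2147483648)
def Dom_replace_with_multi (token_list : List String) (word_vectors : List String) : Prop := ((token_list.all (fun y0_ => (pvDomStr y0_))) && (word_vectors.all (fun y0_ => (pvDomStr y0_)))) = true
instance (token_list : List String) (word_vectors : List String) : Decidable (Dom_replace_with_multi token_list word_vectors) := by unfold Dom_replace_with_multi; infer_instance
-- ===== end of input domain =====

-- B replaces A's per-position rebuild of all prefix-joins (+ filter + max + final filter pass)
-- by one incremental join per start with a running last-in-vocabulary hit and jump advancing: faster.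


-- ===== PORT A =====
def all_concat (token_list : List String) : List (String × Int) :=
  (PySem.List.pyRange 0 (token_list.length : Int) 1).foldl
    (fun all_list i =>
      all_list ++ [(PySem.Str.join "_" (PySem.List.slice token_list none (some (i + 1))), i)]) []

def find_compound (token : String) (ind : Int) (token_list : List String)
    (word_vectors : List String) : String × Int :=
  let all_longs := (all_concat (PySem.List.slice token_list (some ind) none)).filter
    (fun x => word_vectors.contains x.1)
  if ¬ (all_longs = []) then
    match PySem.List.max? all_longs (fun x => x.2) with
    | some best_all => (best_all.1, best_all.2)
    | none => (token, 1)   -- unreachable: max? of a nonempty list is some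
  else (token, 1)

def replace_with_multi (token_list : List String) (word_vectors : List String) : List String :=
  ((PySem.List.enumerate token_list 0).foldl
    (fun (st : List String × Int) ci =>
      if ci.1 < st.2 then st
      else
        let newc := find_compound ci.2 ci.1 token_list word_vectors
        (st.1 ++ [newc.1], ci.1 + newc.2 + 1)) ([], 0)).1.filter
    (fun x => word_vectors.contains x)

-- ===== PORT B =====
def bInner (token_list : List String) (vocab : PySem.Set String) (pos : Int) :
    String × Option (String × Int) :=
  (PySem.List.pyRange pos (token_list.length : Int) 1).foldl
    (fun (st : String × Option (String × Int)) j =>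
      let joined := if j = pos then PySem.List.pyGetD token_list j ""
                    else st.1 ++ "_" ++ PySem.List.pyGetD token_list j ""
      let best := if PySem.Set.contains vocab joined then some (joined, j - pos) else st.2
      (joined, best)) ("", none)

def bLoop (token_list : List String) (vocab : PySem.Set String) (out : List String)
    (pos : Nat) : List String :=
  if _h : pos < token_list.length then
    match (bInner token_list vocab (pos : Int)).2 with
    | none => bLoop token_list vocab out (pos + 2)
    | some (s, i) => bLoop token_list vocab (out ++ [s]) (pos + i.toNat + 1)
  else out
termination_by token_list.length - pos

def replace_with_multi_alt (token_list : List String) (word_vectors : List String) : List String :=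
  bLoop token_list (PySem.Set.ofList word_vectors) [] 0

-- ===== PRECONDITION & SPEC =====
def Spec_replace_with_multi (token_list : List String) (word_vectors : List String) (out : List String) : Prop := out = replace_with_multi_alt token_list word_vectors
instance (token_list : List String) (word_vectors : List String) (out : List String) : Decidable (Spec_replace_with_multi token_list word_vectors out) := by unfold Spec_replace_with_multi; infer_instance

-- ===== CLAIM (what is proved, stated in full; the proofs are below) =====
def Claim_equal_replace_with_multi : Prop := ∀ (token_list : List String) (word_vectors : List String), Dom_replace_with_multi token_list word_vectors → Spec_replace_with_multi token_list word_vectors (replace_with_multi token_list word_vectors)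

-- ===== LEMMAS AND PROOFS =====

-- `catS tl p k` = the '_'-join of the k tokens starting at position p
def catS (tl : List String) (p k : Nat) : String :=
  PySem.Str.join "_" ((tl.drop p).take k)

-- `hitB tl wv p i` : the compound of i+1 tokens starting at p is in the vocabulary list
def hitB (tl wv : List String) (p i : Nat) : Bool :=
  wv.contains (catS tl p (i + 1))

-- last index below k satisfying P, as the running-update fold both programs perform
def lastHit (P : Nat → Bool) (k : Nat) : Option Nat :=
  (List.range k).foldl (fun acc i => if P i then some i else acc) none

def bestL (tl wv : List String) (p : Nat) : Option Nat :=
  lastHit (hitB tl wv p) (tl.length - p)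

-- A's loop with the skip window, written as jump recursion (before the final filter)
def askip (tl wv : List String) (p ng : Nat) : List String :=
  if h : p < tl.length then
    if p < ng then askip tl wv (p + 1) ng
    else
      match bestL tl wv p with
      | some i => catS tl p (i + 1) :: askip tl wv (p + 1) (p + i + 1)
      | none => tl[p] :: askip tl wv (p + 1) (p + 2)
  else []
termination_by tl.length - p

-- B's loop without its accumulator
def bgo (tl wv : List String) (p : Nat) : List String :=
  if p < tl.length then
    match bestL tl wv p with
    | some i => catS tl p (i + 1) :: bgo tl wv (p + i + 1)
    | none => bgo tl wv (p + 2)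
  else []
termination_by tl.length - p
decreasing_by all_goals omega

theorem lastHit_succ (P : Nat → Bool) (k : Nat) :
    lastHit P (k + 1) = if P k then some k else lastHit P k := by
  simp [lastHit, List.range_succ]

theorem lastHit_none_iff (P : Nat → Bool) (k : Nat) :
    lastHit P k = none ↔ ∀ i < k, P i = false := by
  induction k with
  | zero => simp [lastHit]
  | succ k ih =>
    rw [lastHit_succ]
    by_cases hk : P k = true
    · simp only [hk, if_true]
      constructor
      · intro h; cases h
      · intro h; exact absurd hk (by simp [h k (by omega)])
    · simp only [Bool.not_eq_true] at hk
      simp only [hk, Bool.false_eq_true, if_false, ih]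
      constructor
      · intro h i hi
        rcases Nat.lt_succ_iff_lt_or_eq.mp hi with h' | rfl
        · exact h i h'
        · exact hk
      · intro h i hi; exact h i (by omega)

theorem lastHit_some (P : Nat → Bool) (k i : Nat) (h : lastHit P k = some i) :
    i < k ∧ P i = true ∧ ∀ j, i < j → j < k → P j = false := by
  induction k with
  | zero => simp [lastHit] at h
  | succ k ih =>
    rw [lastHit_succ] at h
    by_cases hk : P k = true
    · simp only [hk, if_true, Option.some.injEq] at h
      subst h
      exact ⟨by omega, hk, fun j h1 h2 => by omega⟩
    · simp only [Bool.not_eq_true] at hk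
      rw [hk] at h; simp only [Bool.false_eq_true, if_false] at h
      obtain ⟨h1, h2, h3⟩ := ih h
      refine ⟨by omega, h2, fun j hj1 hj2 => ?_⟩
      rcases Nat.lt_succ_iff_lt_or_eq.mp hj2 with h' | rfl
      · exact h3 j hj1 h'
      · exact hk

theorem all_concat_eq (xs : List String) :
    all_concat xs = (List.range xs.length).map
      (fun i => (PySem.Str.join "_" (xs.take (i + 1)), (i : Int))) := by
  unfold all_concat
  rw [PySem.List.foldl_append_singleton_eq_map, PySem.List.pyRange_one]
  simp only [Int.sub_zero, Int.toNat_natCast, List.map_map, List.nil_append]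
  apply List.map_congr_left
  intro k _
  simp only [Function.comp_apply, Int.zero_add]
  rw [show ((k : Int) + 1) = ((k + 1 : Nat) : Int) by push_cast; ring,
    PySem.List.slice_to_natCast]

theorem find_compound_eq (t : String) (tl wv : List String) (p : Nat) :
    find_compound t (p : Int) tl wv =
      (match bestL tl wv p with
       | some i => (catS tl p (i + 1), (i : Int))
       | none => (t, 1)) := by
  unfold find_compound
  rw [PySem.List.slice_from_natCast, all_concat_eq, List.filter_map]
  have hQ : ∀ i : Nat,
      ((fun x : String × Int => wv.contains x.1) ∘
        (fun i => (PySem.Str.join "_" ((tl.drop p).take (i + 1)), (i : Int)))) i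
      = hitB tl wv p i := fun i => rfl
  have hk : (tl.drop p).length = tl.length - p := List.length_drop
  have hbest : bestL tl wv p = lastHit (hitB tl wv p) (tl.drop p).length := by
    rw [bestL, hk]
  cases hcase : lastHit (hitB tl wv p) (tl.drop p).length with
  | none =>
    have hnone : (List.range (tl.drop p).length).filter
        ((fun x : String × Int => wv.contains x.1) ∘
          (fun i => (PySem.Str.join "_" ((tl.drop p).take (i + 1)), (i : Int)))) = [] := by
      rw [List.filter_eq_nil_iff]
      intro i hi
      rw [hQ i]
      exact Bool.not_eq_true _ ▸
        ((lastHit_none_iff _ _).mp hcase i (List.mem_range.mp hi) ▸ by simp)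
    rw [hnone]
    simp only [List.map_nil, not_true_eq_false, if_false]
    rw [hbest, hcase]
  | some i =>
    obtain ⟨hik, hPi, hmax⟩ := lastHit_some _ _ _ hcase
    have hQ' : (fun x : String × Int => wv.contains x.1) ∘
        (fun i => (PySem.Str.join "_" ((tl.drop p).take (i + 1)), (i : Int)))
        = hitB tl wv p := funext hQ
    rw [hQ']
    have hmem : i ∈ (List.range (tl.drop p).length).filter (hitB tl wv p) :=
      List.mem_filter.mpr ⟨List.mem_range.mpr hik, hPi⟩
    set l := ((List.range (tl.drop p).length).filter (hitB tl wv p)).map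
      (fun i => (PySem.Str.join "_" ((tl.drop p).take (i + 1)), (i : Int))) with hl
    have hne : ¬ (l = []) := by
      intro hnil
      exact absurd hnil (List.ne_nil_of_mem (hl ▸ List.mem_map_of_mem hmem))
    rw [if_pos hne]
    cases hm : PySem.List.max? l (fun x => x.2) with
    | none => exact absurd ((PySem.List.max?_eq_none_iff _ _).mp hm) hne
    | some m =>
      obtain ⟨i₁, hi₁mem, hfi₁⟩ := List.mem_map.mp (PySem.List.max?_mem hm)
      obtain ⟨hi₁r, hQi₁⟩ := List.mem_filter.mp hi₁mem
      have hi₁k := List.mem_range.mp hi₁r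
      have hle : (i : Int) ≤ m.2 :=
        PySem.List.max?_isMax hm _ (List.mem_map_of_mem hmem)
      have hm2 : m.2 = (i₁ : Int) := by rw [← hfi₁]
      have hii₁ : i ≤ i₁ := by
        have := hle; rw [hm2] at this; exact_mod_cast this
      have hi₁i : i₁ ≤ i := by
        by_contra hlt
        have := hmax i₁ (by omega) hi₁k
        rw [this] at hQi₁; cases hQi₁
      have : i₁ = i := by omega
      subst this
      rw [hbest, hcase, ← hfi₁]
      rfl

theorem charsJoin_snoc (sep y : List Char) :
    ∀ xs : List (List Char), xs ≠ [] →
      PySem.Chars.join sep (xs ++ [y]) = PySem.Chars.join sep xs ++ sep ++ y := by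
  intro xs
  induction xs with
  | nil => intro h; cases h rfl
  | cons a rest ih =>
    intro _
    cases rest with
    | nil => simp [PySem.Chars.join_cons_cons, PySem.Chars.join_singleton]
    | cons b t =>
      have := ih (by simp)
      simp only [List.cons_append, PySem.Chars.join_cons_cons] at *
      rw [this]
      simp [List.append_assoc]

theorem strJoin_nil : PySem.Str.join "_" [] = "" := by
  apply String.toList_inj.mp
  simp [PySem.Str.toList_join, PySem.Chars.join_nil]

theorem strJoin_singleton (y : String) : PySem.Str.join "_" [y] = y := by
  apply String.toList_inj.mp
  simp [PySem.Str.toList_join, PySem.Chars.join_singleton]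

theorem strJoin_snoc (xs : List String) (y : String) (h : xs ≠ []) :
    PySem.Str.join "_" (xs ++ [y]) = PySem.Str.join "_" xs ++ "_" ++ y := by
  apply String.toList_inj.mp
  simp only [PySem.Str.toList_join, List.map_append, List.map_cons, List.map_nil,
    String.toList_append]
  exact charsJoin_snoc _ _ _ (by simpa using h)

theorem catS_zero (tl : List String) (p : Nat) : catS tl p 0 = "" := by
  simp [catS, strJoin_nil]

theorem catS_one (tl : List String) (p : Nat) (h : p < tl.length) :
    catS tl p 1 = tl[p] := by
  rw [catS, List.drop_eq_getElem_cons h, List.take_succ_cons, List.take_zero,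
    strJoin_singleton]

theorem catS_succ (tl : List String) (p k : Nat) (hk : 1 ≤ k)
    (h : p + k < tl.length) :
    catS tl p (k + 1) = catS tl p k ++ "_" ++ tl[p + k] := by
  have hdrop : k < (tl.drop p).length := by
    rw [List.length_drop]; omega
  rw [catS, catS, List.take_succ, List.getElem?_drop,
    List.getElem?_eq_getElem (show p + k < tl.length from h)]
  simp only [Option.toList_some]
  exact strJoin_snoc _ _ (by
    intro hnil
    have := congrArg List.length hnil
    simp [List.length_take, hdrop] at this
    omega)

theorem catS_succ' (tl : List String) (p k q : Nat) (hk : 1 ≤ k)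
    (hq : q = p + k) (h : q < tl.length) :
    catS tl p (k + 1) = catS tl p k ++ "_" ++ tl[q] := by
  subst hq
  exact catS_succ tl p k hk h

theorem setContains_ofList (wv : List String) (x : String) :
    PySem.Set.contains (PySem.Set.ofList wv) x = wv.contains x := by
  by_cases hmem : x ∈ wv
  · rw [(PySem.Set.contains_iff _ _).mpr ((PySem.Set.mem_ofList _ _).mpr hmem)]
    exact (List.contains_iff_mem.mpr hmem).symm
  · have h1 : ¬ (PySem.Set.contains (PySem.Set.ofList wv) x = true) :=
      fun hc => hmem ((PySem.Set.mem_ofList _ _).mp ((PySem.Set.contains_iff _ _).mp hc))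
    have h2 : ¬ (wv.contains x = true) := fun hc => hmem (List.contains_iff_mem.mp hc)
    simp only [Bool.not_eq_true] at h1 h2
    rw [h1, h2]

theorem bInner_fold (tl wv : List String) (p : Nat) :
    ∀ m : Nat, p ≤ m → m ≤ tl.length →
      (PySem.List.pyRange (p : Int) (m : Int) 1).foldl
        (fun (st : String × Option (String × Int)) j =>
          let joined := if j = (p : Int) then PySem.List.pyGetD tl j ""
                        else st.1 ++ "_" ++ PySem.List.pyGetD tl j ""
          let best := if PySem.Set.contains (PySem.Set.ofList wv) joined then
                        some (joined, j - (p : Int)) else st.2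
          (joined, best)) ("", none)
      = (catS tl p (m - p), (lastHit (hitB tl wv p) (m - p)).map
          (fun i => (catS tl p (i + 1), (i : Int)))) := by
  intro m
  induction m with
  | zero =>
    intro hpm _
    have : p = 0 := by omega
    subst this
    rw [PySem.List.pyRange_one_eq_nil (by omega)]
    simp [lastHit, catS_zero]
  | succ m ih =>
    intro hpm hmn
    by_cases hpe : p = m + 1
    · subst hpe
      rw [PySem.List.pyRange_one_eq_nil (by omega)]
      simp [lastHit, catS_zero]
    · have hpm' : p ≤ m := by omega
      have hmlt : m < tl.length := by omega
      rw [show ((m + 1 : Nat) : Int) = (m : Int) + 1 by push_cast; ring,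
        PySem.List.pyRange_one_succ_right (by exact_mod_cast hpm'),
        List.foldl_append, ih hpm' (by omega)]
      simp only [List.foldl_cons, List.foldl_nil]
      have hget : PySem.List.pyGetD tl (m : Int) "" = tl[m] := by
        rw [PySem.List.pyGetD_natCast]
        exact List.getD_eq_getElem _ _ hmlt
      have hsub : (m : Int) - (p : Int) = ((m - p : Nat) : Int) := by
        push_cast; omega
      have hmp1 : m + 1 - p = (m - p) + 1 := by omega
      rw [hmp1, lastHit_succ]
      by_cases hmp : m = p
      · subst hmp
        have hcat : catS tl m 1 = tl[m] := catS_one tl m hmlt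
        have hlh0 : lastHit (hitB tl wv m) 0 = none := by simp [lastHit]
        have hhit0 : hitB tl wv m 0 = wv.contains (catS tl m 1) := rfl
        simp only [Nat.sub_self] at *
        by_cases hc : wv.contains tl[m] = true
        · simp [hget, setContains_ofList, hhit0, hcat, hc, hlh0, hsub]
        · simp only [Bool.not_eq_true] at hc
          simp [hget, setContains_ofList, hhit0, hcat, hc, hlh0]
      · have hne : (m : Int) ≠ (p : Int) := by
          intro hc; exact hmp (by exact_mod_cast hc)
        simp only [if_neg hne, hget, setContains_ofList]
        have hk1 : 1 ≤ m - p := by omega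
        have hcat : catS tl p (m - p + 1) = catS tl p (m - p) ++ "_" ++ tl[m] :=
          catS_succ' tl p (m - p) m hk1 (by omega) hmlt
        rw [← hcat]
        have hhit : hitB tl wv p (m - p) = wv.contains (catS tl p (m - p + 1)) := rfl
        rw [hhit]
        by_cases hc : wv.contains (catS tl p (m - p + 1)) = true
        · rw [hc]
          simp [hsub]
        · simp only [Bool.not_eq_true] at hc
          rw [hc]
          simp

theorem bInner_eq (tl wv : List String) (p : Nat) (hp : p ≤ tl.length) :
    (bInner tl (PySem.Set.ofList wv) (p : Int)).2 =
      (bestL tl wv p).map (fun i => (catS tl p (i + 1), (i : Int))) := by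
  unfold bInner
  rw [bInner_fold tl wv p tl.length hp le_rfl]
  rfl

theorem foldA (tl wv : List String) :
    ∀ (fuel p ng : Nat) (acc : List String), tl.length - p ≤ fuel →
      ((PySem.List.enumerate (tl.drop p) (p : Int)).foldl
        (fun (st : List String × Int) ci =>
          if ci.1 < st.2 then st
          else
            let newc := find_compound ci.2 ci.1 tl wv
            (st.1 ++ [newc.1], ci.1 + newc.2 + 1)) (acc, (ng : Int))).1
      = acc ++ askip tl wv p ng := by
  intro fuel
  induction fuel with
  | zero =>
    intro p ng acc hf
    have hpn : tl.length ≤ p := by omega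
    rw [List.drop_eq_nil_of_le hpn, PySem.List.enumerate_nil, List.foldl_nil,
      askip, dif_neg (by omega)]
    simp
  | succ f ih =>
    intro p ng acc hf
    by_cases h : p < tl.length
    · rw [List.drop_eq_getElem_cons h, PySem.List.enumerate_cons, List.foldl_cons]
      dsimp only
      by_cases hskip : p < ng
      · rw [if_pos (by exact_mod_cast hskip),
          show ((p : Int) + 1) = ((p + 1 : Nat) : Int) by push_cast; ring,
          ih (p + 1) ng acc (by omega)]
        conv_rhs => rw [askip, dif_pos h, if_pos hskip]
      · have hskip' : ¬ ((p : Int) < (ng : Int)) := by exact_mod_cast hskip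
        rw [if_neg hskip']
        simp only [find_compound_eq]
        cases hb : bestL tl wv p with
        | some i =>
          dsimp only
          rw [show ((p : Int) + 1) = ((p + 1 : Nat) : Int) by push_cast; ring,
            show ((p : Int) + (i : Int) + 1) = ((p + i + 1 : Nat) : Int) by push_cast; ring,
            ih (p + 1) (p + i + 1) _ (by omega)]
          conv_rhs => rw [askip, dif_pos h, if_neg hskip, hb]
          simp
        | none =>
          dsimp only
          rw [show ((p : Int) + 1) = ((p + 1 : Nat) : Int) by push_cast; ring,
            show ((p + 1 : Nat) : Int) + 1 = ((p + 2 : Nat) : Int) by push_cast; ring,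
            ih (p + 1) (p + 2) _ (by omega)]
          conv_rhs => rw [askip, dif_pos h, if_neg hskip, hb]
          simp
    · have hpn : tl.length ≤ p := by omega
      rw [List.drop_eq_nil_of_le hpn, PySem.List.enumerate_nil, List.foldl_nil,
        askip, dif_neg (by omega)]
      simp

theorem bLoop_eq (tl wv : List String) :
    ∀ (fuel p : Nat) (out : List String), tl.length - p ≤ fuel →
      bLoop tl (PySem.Set.ofList wv) out p = out ++ bgo tl wv p := by
  intro fuel
  induction fuel with
  | zero =>
    intro p out hf
    rw [bLoop, dif_neg (by omega), bgo, if_neg (by omega)]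
    simp
  | succ f ih =>
    intro p out hf
    by_cases h : p < tl.length
    · rw [bLoop, dif_pos h, bInner_eq tl wv p (by omega)]
      cases hb : bestL tl wv p with
      | none =>
        simp only [Option.map_none]
        rw [ih (p + 2) out (by omega)]
        conv_rhs => rw [bgo, if_pos h, hb]
      | some i =>
        simp only [Option.map_some]
        rw [show ((i : Int).toNat) = i from Int.toNat_natCast i,
          ih (p + i + 1) (out ++ [catS tl p (i + 1)]) (by omega)]
        conv_rhs => rw [bgo, if_pos h, hb]
        simp
    · rw [bLoop, dif_neg h, bgo, if_neg h]
      simp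

theorem filter_askip (tl wv : List String) :
    ∀ (fuel p ng : Nat), tl.length - p ≤ fuel →
      (askip tl wv p ng).filter (fun x => wv.contains x) = bgo tl wv (max p ng) := by
  intro fuel
  induction fuel with
  | zero =>
    intro p ng hf
    rw [askip, dif_neg (by omega), bgo, if_neg (by omega)]
    simp
  | succ f ih =>
    intro p ng hf
    by_cases h : p < tl.length
    · rw [askip, dif_pos h]
      by_cases hskip : p < ng
      · rw [if_pos hskip, ih (p + 1) ng (by omega),
          show max (p + 1) ng = max p ng by omega]
      · rw [if_neg hskip, show max p ng = p by omega]
        cases hb : bestL tl wv p with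
        | some i =>
          obtain ⟨hik, hPi, _⟩ := lastHit_some _ _ _ hb
          have hcont : wv.contains (catS tl p (i + 1)) = true := hPi
          rw [List.filter_cons_of_pos hcont, ih (p + 1) (p + i + 1) (by omega),
            show max (p + 1) (p + i + 1) = p + i + 1 by omega]
          conv_rhs => rw [bgo, if_pos h, hb]
        | none =>
          have h0 : hitB tl wv p 0 = false :=
            (lastHit_none_iff _ _).mp hb 0 (by omega)
          have hcont : wv.contains tl[p] = false := by
            rw [← catS_one tl p h]
            exact h0
          rw [List.filter_cons_of_neg (by simpa using hcont),
            ih (p + 1) (p + 2) (by omega),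
            show max (p + 1) (p + 2) = p + 2 by omega]
          conv_rhs => rw [bgo, if_pos h, hb]
    · rw [askip, dif_neg h, bgo, if_neg (by omega)]
      simp

-- ===== VERDICT (by name: the statement is the Claim_ definition above) =====
theorem replace_with_multi_spec : Claim_equal_replace_with_multi := by
  intro tl wv _
  unfold Spec_replace_with_multi replace_with_multi replace_with_multi_alt
  have hA := foldA tl wv tl.length 0 0 [] (by omega)
  simp only [List.drop_zero, Int.natCast_zero] at hA
  rw [hA, bLoop_eq tl wv tl.length 0 [] (by omega)]
  simpa using filter_askip tl wv tl.length 0 0 (by omega)
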